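-- pv_equiv track=rewrite | github.com/mariotv3/Scalable_Duplicate_Detection_MSMPplusplus | src/preprocessing/cleaning.py | propagate_brands_in_cluster
-- ===== SOURCE A (Python) =====
-- from collections import OrderedDict, defaultdict, Counter
--
-- def propagate_brands_in_cluster(cluster_to_brands):
--     updated = {}
--     known_brands = set()
--     for cid, brands in cluster_to_brands.items():
--         non_unknown = [b for b in brands if b != "unknown"]
--         if non_unknown:
--             counts = Counter(non_unknown)
--             max_count = max(counts.values())
--             candidates = [b for b, c in counts.items() if c == max_count]
--             most_common_brand = sorted(candidates)[0]
--             updated[cid] = [most_common_brand] * len(brands)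
--             known_brands.add(most_common_brand)
--         else:
--             updated[cid] = list(brands)
--     return updated, known_brands
-- ===== SOURCE B (Python) =====
-- def propagate_brands_in_cluster(cluster_to_brands):
--     updated = {}
--     known_brands = set()
--     for cid, brands in cluster_to_brands.items():
--         non_unknown = sorted(b for b in brands if b != "unknown")
--         if not non_unknown:
--             updated[cid] = list(brands)
--             continue
--         best = cur = non_unknown[0]
--         best_run = cur_run = 1
--         for b in non_unknown[1:]:
--             if b == cur:
--                 cur_run += 1
--             else:
--                 cur, cur_run = b, 1
--             if cur_run > best_run:
--                 best, best_run = cur, cur_run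
--         updated[cid] = [best] * len(brands)
--         known_brands.add(best)
--     return updated, known_brands
-- ===== Notes on version B (the rewrite author's own statement) =====
-- stated objective: alternative
-- what changed: Per cluster, replaces the Counter + max + candidate-filter + sort-of-candidates pipeline by sorting the non-unknown brands once and doing a single run-length scan with a strict '>' update, which picks the lexicographically smallest most-frequent brand directly.
import Mathlib
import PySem

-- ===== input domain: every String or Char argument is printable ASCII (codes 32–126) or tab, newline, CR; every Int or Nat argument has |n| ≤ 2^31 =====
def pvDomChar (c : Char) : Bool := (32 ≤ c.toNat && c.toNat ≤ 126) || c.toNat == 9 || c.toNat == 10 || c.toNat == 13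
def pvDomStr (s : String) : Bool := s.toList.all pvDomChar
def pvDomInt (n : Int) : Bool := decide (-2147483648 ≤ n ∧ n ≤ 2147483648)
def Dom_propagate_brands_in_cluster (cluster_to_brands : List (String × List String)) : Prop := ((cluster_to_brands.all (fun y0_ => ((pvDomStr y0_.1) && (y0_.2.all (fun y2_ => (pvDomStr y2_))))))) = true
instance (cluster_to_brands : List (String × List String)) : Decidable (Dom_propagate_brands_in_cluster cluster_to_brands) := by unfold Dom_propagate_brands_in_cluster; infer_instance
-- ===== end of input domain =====

-- B replaces the per-cluster Counter/max/filter/sort-candidates pipeline by one sort of the brand list plus a run-length scan (alternative decomposition, same results).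


-- ===== PORT A =====
-- A-side helper: the per-cluster choice of the most common non-"unknown" brand (Counter, max of values, candidate filter, sorted(...)[0])
def pvPickA (non_unknown : List String) : String :=
  let counts := PySem.Dict.counter non_unknown
  -- max(counts.values()): values is nonempty whenever non_unknown ≠ [], so the .getD 0 default is never used
  let max_count := (PySem.List.max? (PySem.Dict.values counts) (fun x => x)).getD 0
  let candidates := (counts.items.filter (fun bc => bc.2 == max_count)).map (fun bc => bc.1)
  -- sorted(candidates)[0]: candidates is nonempty whenever non_unknown ≠ [], so the .headD "" default is never used
  (PySem.List.sorted candidates (fun x => x) false).headD ""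

-- A-side helper: one iteration of A's loop over cluster_to_brands.items()
def pvStepA (acc : PySem.Dict String (List String) × PySem.Set String) (p : String × List String) :
    PySem.Dict String (List String) × PySem.Set String :=
  let non_unknown := p.2.filter (fun b => b ≠ "unknown")
  if non_unknown ≠ [] then
    let most_common := pvPickA non_unknown
    (acc.1.insert p.1 (List.replicate p.2.length most_common), PySem.Set.add acc.2 most_common)
  else
    (acc.1.insert p.1 p.2, acc.2)

def propagate_brands_in_cluster (cluster_to_brands : List (String × List String)) : (List (String × List String)) × List String :=
  let res := cluster_to_brands.foldl pvStepA (PySem.Dict.empty, PySem.Set.empty)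
  (res.1.items, res.2)

-- ===== PORT B =====
-- B-side helper: one step of the run-length scan; state is (cur, cur_run, best, best_run)
def pvStep (st : String × Nat × String × Nat) (b : String) : String × Nat × String × Nat :=
  let cc := if b = st.1 then (st.1, st.2.1 + 1) else (b, 1)
  if st.2.2.2 < cc.2 then (cc.1, cc.2, cc.1, cc.2) else (cc.1, cc.2, st.2.2.1, st.2.2.2)

-- B-side helper: one iteration of B's loop (sort the non-unknown brands, then scan runs)
def pvStepB (acc : PySem.Dict String (List String) × PySem.Set String) (p : String × List String) :
    PySem.Dict String (List String) × PySem.Set String :=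
  let non_unknown := PySem.List.sorted (p.2.filter (fun b => b ≠ "unknown")) (fun x => x) false
  match non_unknown with
  | [] => (acc.1.insert p.1 p.2, acc.2)
  | h :: t =>
    let best := (t.foldl pvStep (h, 1, h, 1)).2.2.1
    (acc.1.insert p.1 (List.replicate p.2.length best), PySem.Set.add acc.2 best)

def propagate_brands_in_cluster_alt (cluster_to_brands : List (String × List String)) : (List (String × List String)) × List String :=
  let res := cluster_to_brands.foldl pvStepB (PySem.Dict.empty, PySem.Set.empty)
  (res.1.items, res.2)

-- ===== PRECONDITION & SPEC =====
def Spec_propagate_brands_in_cluster (cluster_to_brands : List (String × List String)) (out : (List (String × List String)) × List String) : Prop := out = propagate_brands_in_cluster_alt cluster_to_brands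
instance (cluster_to_brands : List (String × List String)) (out : (List (String × List String)) × List String) : Decidable (Spec_propagate_brands_in_cluster cluster_to_brands out) := by unfold Spec_propagate_brands_in_cluster; infer_instance

-- ===== CLAIM (what is proved, stated in full; the proofs are below) =====
def Claim_equal_propagate_brands_in_cluster : Prop := ∀ (cluster_to_brands : List (String × List String)), Dom_propagate_brands_in_cluster cluster_to_brands → Spec_propagate_brands_in_cluster cluster_to_brands (propagate_brands_in_cluster cluster_to_brands)

-- ===== LEMMAS AND PROOFS =====

-- Reference recursion for the run-length scan: consume one maximal run at a time.
def pvBref (best : String) (r : Nat) : List String → String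
  | [] => best
  | b :: t =>
    pvBref (if r < (t.takeWhile (fun x => x == b)).length + 1 then b else best)
           (max r ((t.takeWhile (fun x => x == b)).length + 1))
           (t.dropWhile (fun x => x == b))
termination_by l => l.length
decreasing_by
  exact Nat.lt_succ_of_le (List.dropWhile_sublist _).length_le

-- folding pvStep over a run of the current element
lemma pvRun (j : Nat) : ∀ (a best : String) (c r : Nat), c ≤ r →
    (List.replicate j a).foldl pvStep (a, c, best, r)
      = (a, c + j, (if r < c + j then a else best), max r (c + j)) := by
  induction j with
  | zero =>
    intro a best c r h
    simp only [List.replicate, List.foldl_nil, Nat.add_zero]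
    rw [if_neg (by omega)]
    have hm : max r c = r := by omega
    rw [hm]
  | succ j ih =>
    intro a best c r h
    rw [List.replicate_succ, List.foldl_cons]
    have hstep : pvStep (a, c, best, r) a = (a, c + 1, if r < c + 1 then a else best, max r (c + 1)) := by
      by_cases h1 : r < c + 1 <;> simp [pvStep, h1] <;> omega
    rw [hstep, ih a (if r < c + 1 then a else best) (c + 1) (max r (c + 1)) (by omega)]
    simp only [Prod.mk.injEq]
    refine ⟨trivial, by omega, ?_, by omega⟩
    split_ifs <;> first | rfl | omega

-- sorted lists: after dropping the leading run of b, everything is strictly greater than b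
lemma pvDrop : ∀ (t : List String) (b : String), t.Pairwise (· ≤ ·) → (∀ x ∈ t, b ≤ x) →
    ∀ x ∈ t.dropWhile (fun x => x == b), b < x := by
  intro t b
  induction t with
  | nil => intro _ _ x hx; simp at hx
  | cons y ys ih =>
    intro hp hb x hx
    rw [List.dropWhile_cons] at hx
    by_cases hy : y = b
    · rw [if_pos (by simp [hy])] at hx
      exact ih hp.of_cons (fun z hz => by rw [← hy]; exact List.rel_of_pairwise_cons hp hz) x hx
    · rw [if_neg (by simp [hy])] at hx
      have hby : b < y := lt_of_le_of_ne (hb y (by simp)) (Ne.symm hy)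
      rcases List.mem_cons.mp hx with rfl | hxs
      · exact hby
      · exact lt_of_lt_of_le hby (List.rel_of_pairwise_cons hp hxs)

-- a list headed by b is its leading run of b followed by the rest
lemma pvRunDecomp (b : String) (t : List String) :
    b :: t = List.replicate ((t.takeWhile (fun x => x == b)).length + 1) b ++ t.dropWhile (fun x => x == b) := by
  rw [List.replicate_succ, List.cons_append]
  have h1 : List.replicate (t.takeWhile (fun x => x == b)).length b = t.takeWhile (fun x => x == b) := by
    refine (List.eq_replicate_of_mem (fun x hx => ?_)).symm
    have hx' : (x == b) = true := List.mem_takeWhile_imp (p := fun x => x == b) hx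
    exact eq_of_beq hx' 
  rw [h1, List.takeWhile_append_dropWhile]

-- the tail version of the decomposition
lemma pvRunDecompTail (b : String) (t : List String) :
    t = List.replicate (t.takeWhile (fun x => x == b)).length b ++ t.dropWhile (fun x => x == b) := by
  have h := pvRunDecomp b t
  rw [List.replicate_succ, List.cons_append] at h
  exact (List.cons.injEq _ _ _ _ ▸ h).2

-- the scan over a sorted list, entered strictly below its elements, computes pvBref
lemma pvScan : ∀ (n : Nat) (s : List String), s.length ≤ n → s.Pairwise (· ≤ ·) →
    ∀ (a best : String) (c r : Nat), (∀ x ∈ s, a < x) → c ≤ r →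
    (s.foldl pvStep (a, c, best, r)).2.2.1 = pvBref best r s := by
  intro n
  induction n with
  | zero =>
    intro s hlen _ a best c r _ _
    have : s = [] := List.length_eq_zero_iff.mp (Nat.le_zero.mp hlen)
    subst this
    simp [pvBref]
  | succ n ih =>
    intro s hlen hp a best c r ha hcr
    match s, hp, hlen, ha with
    | [], _, _, _ => simp [pvBref]
    | b :: t, hp, hlen, ha =>
      have hba : ¬ (b = a) := fun h => absurd (ha b (List.mem_cons_self)) (h ▸ lt_irrefl a)
      have hstep : pvStep (a, c, best, r) b = (b, 1, if r < 1 then b else best, max r 1) := by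
        by_cases h1 : r < 1 <;> simp [pvStep, hba, h1] <;> omega
      rw [pvBref, List.foldl_cons, hstep]
      conv_lhs => rw [pvRunDecompTail b t, List.foldl_append]
      rw [pvRun _ b (if r < 1 then b else best) 1 (max r 1) (by omega)]
      have htw : (1 : Nat) + (t.takeWhile (fun x => x == b)).length
          = (t.takeWhile (fun x => x == b)).length + 1 := by omega
      rw [htw]
      set k := (t.takeWhile (fun x => x == b)).length + 1 with hk
      have hbest : (if max r 1 < k then b else if r < 1 then b else best)
          = (if r < k then b else best) := by
        split_ifs <;> first | rfl | omega
      have hmax : max (max r 1) k = max r k := by omega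
      rw [hbest, hmax]
      have hsubt : (t.dropWhile (fun x => x == b)).Sublist t := List.dropWhile_sublist _
      have hlen' : (t.dropWhile (fun x => x == b)).length ≤ n := by
        have h1 := hsubt.length_le
        simp only [List.length_cons] at hlen
        omega
      have hp' : (t.dropWhile (fun x => x == b)).Pairwise (· ≤ ·) := List.Pairwise.sublist hsubt hp.of_cons
      have hgt : ∀ x ∈ t.dropWhile (fun x => x == b), b < x :=
        pvDrop t b hp.of_cons (fun x hx => List.rel_of_pairwise_cons hp hx)
      exact ih _ hlen' hp' b (if r < k then b else best) k (max r k) hgt (le_max_right r k)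

-- if no element beats the incumbent run count, pvBref keeps the incumbent
lemma pvBrefNone : ∀ (n : Nat) (s : List String), s.length ≤ n → ∀ (best : String) (r : Nat),
    (∀ y ∈ s, s.count y ≤ r) → pvBref best r s = best := by
  intro n
  induction n with
  | zero =>
    intro s hlen best r _
    have : s = [] := List.length_eq_zero_iff.mp (Nat.le_zero.mp hlen)
    subst this
    simp [pvBref]
  | succ n ih =>
    intro s hlen best r hle
    match s, hlen, hle with
    | [], _, _ => simp [pvBref]
    | b :: t, hlen, hle =>
      rw [pvBref]
      set k := (t.takeWhile (fun x => x == b)).length + 1 with hk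
      have hkcount : k ≤ (b :: t).count b := by
        conv_rhs => rw [pvRunDecomp b t]
        rw [List.count_append, List.count_replicate_self]
        omega
      have hbr : (b :: t).count b ≤ r := hle b (List.mem_cons_self)
      rw [if_neg (by omega)]
      have hmr : max r k = r := by omega
      rw [hmr]
      have hsub : (t.dropWhile (fun x => x == b)).Sublist (b :: t) :=
        (List.dropWhile_sublist _).trans (List.sublist_cons_self b t)
      have hlen' : (t.dropWhile (fun x => x == b)).length ≤ n := by
        have h1 := (List.dropWhile_sublist (l := t) (fun x => x == b)).length_le
        simp only [List.length_cons] at hlen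
        omega
      exact ih _ hlen' best r (fun y hy =>
        le_trans (hsub.count_le y) (hle y (hsub.subset hy)))

-- if some element beats the incumbent, pvBref returns the least most-frequent element
lemma pvBrefSome : ∀ (n : Nat) (s : List String), s.length ≤ n → s.Pairwise (· ≤ ·) →
    ∀ (best : String) (r : Nat), (∃ y ∈ s, r < s.count y) →
    pvBref best r s ∈ s ∧ r < s.count (pvBref best r s) ∧
    (∀ y ∈ s, s.count y ≤ s.count (pvBref best r s)) ∧
    (∀ y ∈ s, s.count (pvBref best r s) ≤ s.count y → pvBref best r s ≤ y) := by
  intro n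
  induction n with
  | zero =>
    intro s hlen _ best r hex
    have : s = [] := List.length_eq_zero_iff.mp (Nat.le_zero.mp hlen)
    subst this
    simp at hex
  | succ n ih =>
    intro s hlen hp best r hex
    match s, hlen, hp, hex with
    | [], _, _, hex => simp at hex
    | b :: t, hlen, hp, hex =>
      set t' := t.dropWhile (fun x => x == b) with ht'
      set k := (t.takeWhile (fun x => x == b)).length + 1 with hk
      have hbt' : ∀ x ∈ t', b < x :=
        pvDrop t b hp.of_cons (fun x hx => List.rel_of_pairwise_cons hp hx)
      have hnb : b ∉ t' := fun hmem => lt_irrefl b (hbt' b hmem)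
      have hdec : b :: t = List.replicate k b ++ t' := pvRunDecomp b t
      have hcb : (b :: t).count b = k := by
        rw [hdec, List.count_append, List.count_replicate_self, List.count_eq_zero.mpr hnb]
      have hcy : ∀ y ∈ t', (b :: t).count y = t'.count y := by
        intro y hy
        have hyb : ¬ ((b == y) = true) :=
          fun hbeq => lt_irrefl y (eq_of_beq hbeq ▸ hbt' y hy)
        rw [hdec, List.count_append, List.count_replicate, if_neg hyb, Nat.zero_add]
      have hsub : t'.Sublist (b :: t) :=
        (List.dropWhile_sublist _).trans (List.sublist_cons_self b t)
      have hlen' : t'.length ≤ n := by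
        rw [ht']
        have h1 := (List.dropWhile_sublist (l := t) (fun x => x == b)).length_le
        simp only [List.length_cons] at hlen
        omega
      have hp' : t'.Pairwise (· ≤ ·) := List.Pairwise.sublist (List.dropWhile_sublist _) hp.of_cons
      have hmemcase : ∀ y, y ∈ b :: t → y = b ∨ y ∈ t' := by
        intro y hy
        rw [hdec] at hy
        rcases List.mem_append.mp hy with h1 | h2
        · exact Or.inl (List.eq_of_mem_replicate h1)
        · exact Or.inr h2
      rw [pvBref]
      rw [← ht', ← hk]
      by_cases hE : ∃ y ∈ t', max r k < t'.count y
      · obtain ⟨hmem, hlt, hmax, hmin⟩ := ih t' hlen' hp' (if r < k then b else best) (max r k) hE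
        set res := pvBref (if r < k then b else best) (max r k) t' with hres
        have hres_s : res ∈ b :: t := hsub.subset hmem
        have hcres : (b :: t).count res = t'.count res := hcy res hmem
        refine ⟨hres_s, ?_, ?_, ?_⟩
        · rw [hcres]
          exact lt_of_le_of_lt (le_max_left r k) hlt
        · intro y hy
          rcases hmemcase y hy with rfl | hyt'
          · rw [hcb, hcres]
            have := le_max_right r k
            omega
          · rw [hcy y hyt', hcres]
            exact hmax y hyt'
        · intro y hy hley
          rcases hmemcase y hy with rfl | hyt'
          · exfalso
            rw [hcb, hcres] at hley
            have := le_max_right r k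
            omega
          · rw [hcy y hyt', hcres] at hley
            exact hmin y hyt' hley
      · simp only [not_exists, not_and, not_lt] at hE
        replace hE : ∀ y ∈ t', t'.count y ≤ max r k := fun y hy => hE y hy
        have hnone := pvBrefNone n t' hlen' (if r < k then b else best) (max r k) hE
        have hrk : r < k := by
          obtain ⟨y0, hy0, hry0⟩ := hex
          rcases hmemcase y0 hy0 with rfl | hyt'
          · rw [hcb] at hry0; exact hry0
          · rw [hcy y0 hyt'] at hry0
            have := hE y0 hyt'
            omega
        rw [hnone, if_pos hrk]
        refine ⟨List.mem_cons_self, ?_, ?_, ?_⟩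
        · rw [hcb]; exact hrk
        · intro y hy
          rcases hmemcase y hy with rfl | hyt'
          · exact le_refl _
          · rw [hcy y hyt', hcb]
            have := hE y hyt'
            omega
        · intro y hy _
          rcases hmemcase y hy with rfl | hyt'
          · exact le_refl _
          · exact le_of_lt (hbt' y hyt')

-- B's scan equals pvBref started at run 0
lemma pvPickB_eq_bref (l : List String) (h : String) (t : List String)
    (hs : PySem.List.sorted l (fun x => x) false = h :: t) :
    (t.foldl pvStep (h, 1, h, 1)).2.2.1 = pvBref h 0 (h :: t) := by
  have hp : (h :: t).Pairwise (· ≤ ·) := by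
    have := PySem.List.sorted_pairwise l (fun x => x)
    rw [hs] at this
    exact this
  set t' := t.dropWhile (fun x => x == h) with ht'
  set j := (t.takeWhile (fun x => x == h)).length with hj
  have hp' : t'.Pairwise (· ≤ ·) := List.Pairwise.sublist (List.dropWhile_sublist _) hp.of_cons
  have hgt : ∀ x ∈ t', h < x :=
    pvDrop t h hp.of_cons (fun x hx => List.rel_of_pairwise_cons hp hx)
  conv_lhs => rw [pvRunDecompTail h t, List.foldl_append]
  rw [← ht', ← hj]
  rw [pvRun j h h 1 1 le_rfl]
  have h1j : max (1 : Nat) (1 + j) = 1 + j := by omega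
  have h2j : (if (1 : Nat) < 1 + j then h else h) = h := by split_ifs <;> rfl
  rw [h1j, h2j]
  rw [pvScan t'.length t' le_rfl hp' h h (1 + j) (1 + j) hgt le_rfl]
  rw [pvBref, ← ht', ← hj]
  have h3 : (0 : Nat) < j + 1 := by omega
  rw [if_pos h3]
  have h4 : max 0 (j + 1) = j + 1 := by omega
  rw [h4]
  have h5 : (1 : Nat) + j = j + 1 := by omega
  rw [h5]

-- the per-cluster results of A and B coincide
lemma pvPick_eq (l : List String) (h : String) (t : List String)
    (hs : PySem.List.sorted l (fun x => x) false = h :: t) :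
    pvPickA l = (t.foldl pvStep (h, 1, h, 1)).2.2.1 := by
  rw [pvPickB_eq_bref l h t hs]
  have hp : (h :: t).Pairwise (· ≤ ·) := by
    have := PySem.List.sorted_pairwise l (fun x => x)
    rw [hs] at this
    exact this
  have hperm : (h :: t).Perm l := by
    rw [← hs]; exact PySem.List.sorted_perm l (fun x => x) false
  have hcount : ∀ y, (h :: t).count y = l.count y := fun y => hperm.count_eq y
  have hmeml : ∀ y, y ∈ h :: t ↔ y ∈ l := fun y => hperm.mem_iff
  obtain ⟨hresmem, _, hmax, hmin⟩ :=
    pvBrefSome (h :: t).length (h :: t) le_rfl hp h 0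
      ⟨h, List.mem_cons_self, List.count_pos_iff.mpr List.mem_cons_self⟩
  set res := pvBref h 0 (h :: t) with hres
  have hresl : res ∈ l := (hmeml res).mp hresmem
  -- unfold A's pipeline
  show (PySem.List.sorted
      (((PySem.Dict.counter l).items.filter
        (fun bc => bc.2 == (PySem.List.max? (PySem.Dict.values (PySem.Dict.counter l)) (fun x => x)).getD 0)).map
        (fun bc => bc.1)) (fun x => x) false).headD "" = res
  have hitems : (PySem.Dict.counter l).items
      = (PySem.Set.ofList l).map (fun k => (k, (l.count k : Int))) := PySem.Dict.items_counter l
  have hvals : PySem.Dict.values (PySem.Dict.counter l)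
      = (PySem.Set.ofList l).map (fun k => (l.count k : Int)) := by
    show ((PySem.Dict.counter l).items).map (fun kv => kv.2) = _
    rw [hitems, List.map_map]
    rfl
  have hhl : h ∈ l := (hmeml h).mp List.mem_cons_self
  have hvne : PySem.Dict.values (PySem.Dict.counter l) ≠ [] := by
    rw [hvals]
    intro hnil
    have := (PySem.Set.mem_ofList l h).mpr hhl
    rw [List.map_eq_nil_iff.mp hnil] at this
    simp at this
  obtain ⟨m, hmx⟩ : ∃ m, PySem.List.max? (PySem.Dict.values (PySem.Dict.counter l)) (fun x => x) = some m := by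
    cases hone : PySem.List.max? (PySem.Dict.values (PySem.Dict.counter l)) (fun x => x) with
    | none => exact absurd ((PySem.List.max?_eq_none_iff _ _).mp hone) hvne
    | some m => exact ⟨m, rfl⟩
  have hm_mem : m ∈ PySem.Dict.values (PySem.Dict.counter l) := PySem.List.max?_mem hmx
  have hm_max : ∀ v ∈ PySem.Dict.values (PySem.Dict.counter l), v ≤ m :=
    fun v hv => PySem.List.max?_isMax hmx v hv
  have hm_eq : m = (l.count res : Int) := by
    rw [hvals] at hm_mem hm_max
    obtain ⟨k0, hk0S, hk0⟩ := List.mem_map.mp hm_mem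
    have hk0l : k0 ∈ l := (PySem.Set.mem_ofList l k0).mp hk0S
    have h1 : l.count k0 ≤ l.count res := by
      rw [← hcount, ← hcount]
      exact hmax k0 ((hmeml k0).mpr hk0l)
    have h2 : (l.count res : Int) ≤ m := by
      refine hm_max _ (List.mem_map.mpr ⟨res, (PySem.Set.mem_ofList l res).mpr hresl, rfl⟩)
    rw [← hk0]
    exact le_antisymm (by exact_mod_cast h1) (hk0 ▸ h2)
  rw [hmx]
  set cand := (((PySem.Dict.counter l).items.filter (fun bc => bc.2 == (some m).getD 0)).map
      (fun bc => bc.1)) with hcand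
  have hrescand : res ∈ cand := by
    rw [hcand]
    refine List.mem_map.mpr ⟨(res, (l.count res : Int)), ?_, rfl⟩
    refine List.mem_filter.mpr ⟨?_, ?_⟩
    · rw [hitems]
      exact List.mem_map.mpr ⟨res, (PySem.Set.mem_ofList l res).mpr hresl, rfl⟩
    · simp [hm_eq]
  have hcandmin : ∀ y ∈ cand, res ≤ y := by
    intro y hy
    rw [hcand] at hy
    obtain ⟨bc, hbc, hbcy⟩ := List.mem_map.mp hy
    have hbcf := List.mem_filter.mp hbc
    rw [hitems] at hbcf
    obtain ⟨k1, hk1S, hk1⟩ := List.mem_map.mp hbcf.1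
    have hk1l : k1 ∈ l := (PySem.Set.mem_ofList l k1).mp hk1S
    have hck1 : (l.count k1 : Int) = m := by
      have := hbcf.2
      rw [← hk1] at this
      simpa using this
    have hcnt : l.count res ≤ l.count k1 := by
      have : (l.count k1 : Int) = (l.count res : Int) := by rw [hck1, hm_eq]
      omega
    have hres_le : res ≤ k1 := by
      apply hmin k1 ((hmeml k1).mpr hk1l)
      rw [hcount, hcount]
      exact hcnt
    rw [← hbcy, ← hk1]
    exact hres_le
  have hcandne : cand ≠ [] := List.ne_nil_of_mem hrescand
  cases hsc : PySem.List.sorted cand (fun x => x) false with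
  | nil => exact absurd ((PySem.List.sorted_eq_nil_iff cand _ false).mp hsc) hcandne
  | cons m0 rest =>
    have hm0cand : m0 ∈ cand := (PySem.List.mem_sorted cand _ false m0).mp (hsc ▸ List.mem_cons_self)
    have h1 : m0 ≤ res := PySem.List.key_head_sorted_le cand (fun x => x) hsc res hrescand
    have h2 : res ≤ m0 := hcandmin m0 hm0cand
    simp only [List.headD_cons]
    exact le_antisymm h1 h2

lemma pvStep_eq : pvStepA = pvStepB := by
  funext acc p
  simp only [pvStepA, pvStepB]
  cases hs : PySem.List.sorted (p.2.filter (fun b => b ≠ "unknown")) (fun x => x) false with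
  | nil =>
    have hl : p.2.filter (fun b => b ≠ "unknown") = [] :=
      (PySem.List.sorted_eq_nil_iff _ _ false).mp hs
    rw [if_neg (by simpa using hl)]
  | cons h t =>
    have hl : p.2.filter (fun b => b ≠ "unknown") ≠ [] := by
      intro h0
      rw [h0] at hs
      have := (PySem.List.sorted_eq_nil_iff ([] : List String) (fun x : String => x) false).mpr rfl
      rw [this] at hs
      simp at hs
    rw [if_pos hl, pvPick_eq _ h t hs]

-- ===== VERDICT (by name: the statement is the Claim_ definition above) =====
theorem propagate_brands_in_cluster_spec : Claim_equal_propagate_brands_in_cluster := by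
  intro cl _
  show _ = _
  unfold propagate_brands_in_cluster propagate_brands_in_cluster_alt
  rw [pvStep_eq]
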